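-- pv_equiv track=rewrite | github.com/Fragipani/EZlearner | Difficulty/WordDiff.py | getNumberOfRareLetters
-- ===== SOURCE A (Python) =====
-- def getNumberOfRareLetters(input_word):
--     count = 0
--     rareLetters = ['q', 'x', 'y', 'j', 'ß', 'v', 'p', 'z']
--
--     for rareLetter in rareLetters:
--         count += input_word.count(rareLetter)
--
--     if count >= 4:
--         calc_value = 5
--     elif count >= 3:
--         calc_value = 4
--     elif count >= 2:
--         calc_value = 3
--     elif count == 1:
--         calc_value = 2
--     elif count == 0:
--         calc_value = 1
--
--     return calc_value
-- ===== SOURCE B (Python) =====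
-- def getNumberOfRareLetters(input_word):
--     rare = {'q', 'x', 'y', 'j', 'ß', 'v', 'p', 'z'}
--     count = 0
--     for ch in input_word:
--         if ch in rare:
--             count += 1
--     return min(count + 1, 5)
-- ===== Notes on version B (the rewrite author's own statement) =====
-- stated objective: simpler
-- what changed: One pass over the word's characters testing membership in a set of rare letters (instead of eight separate str.count scans), and the five-branch bucket cascade collapsed to the closed form min(count + 1, 5).
import Mathlib
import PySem

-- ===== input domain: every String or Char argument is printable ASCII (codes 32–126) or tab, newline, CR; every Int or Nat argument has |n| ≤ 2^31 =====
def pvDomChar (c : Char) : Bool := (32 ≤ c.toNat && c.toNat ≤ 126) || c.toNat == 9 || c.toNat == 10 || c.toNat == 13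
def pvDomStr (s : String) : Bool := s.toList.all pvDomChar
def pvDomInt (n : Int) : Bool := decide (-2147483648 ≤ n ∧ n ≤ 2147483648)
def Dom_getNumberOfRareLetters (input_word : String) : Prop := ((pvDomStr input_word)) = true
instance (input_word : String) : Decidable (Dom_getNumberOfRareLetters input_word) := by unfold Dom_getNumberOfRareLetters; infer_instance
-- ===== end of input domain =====

-- B replaces A's eight str.count scans by one pass over the word testing set membership,
-- and collapses A's five-branch bucket cascade to the closed form min(count + 1, 5) (simpler, same cost).


-- ===== PORT A =====
-- Python A: count = 0; for rareLetter in rareLetters: count += input_word.count(rareLetter);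
-- then the if/elif cascade.  count is a sum of Nat counts, so count ≥ 0 and the
-- 'elif count == 0' branch is the only remaining case of the chain (UnboundLocalError unreachable).
def getNumberOfRareLetters (input_word : String) : Int :=
  let rareLetters : List String := ["q", "x", "y", "j", "ß", "v", "p", "z"]
  let count : Int := rareLetters.foldl (fun acc r => acc + (PySem.Str.count input_word r : Int)) 0
  if count ≥ 4 then 5
  else if count ≥ 3 then 4
  else if count ≥ 2 then 3
  else if count = 1 then 2
  else 1

-- ===== PORT B =====
def getNumberOfRareLetters_alt (input_word : String) : Int :=
  let rare : PySem.Set Char := PySem.Set.ofList ['q', 'x', 'y', 'j', 'ß', 'v', 'p', 'z']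
  let count : Int := input_word.toList.foldl (fun acc ch => if PySem.Set.contains rare ch then acc + 1 else acc) 0
  min (count + 1) 5

-- ===== PRECONDITION & SPEC =====
def Spec_getNumberOfRareLetters (input_word : String) (out : Int) : Prop := out = getNumberOfRareLetters_alt input_word
instance (input_word : String) (out : Int) : Decidable (Spec_getNumberOfRareLetters input_word out) := by unfold Spec_getNumberOfRareLetters; infer_instance

-- ===== CLAIM (what is proved, stated in full; the proofs are below) =====
def Claim_equal_getNumberOfRareLetters : Prop := ∀ (input_word : String), Dom_getNumberOfRareLetters input_word → Spec_getNumberOfRareLetters input_word (getNumberOfRareLetters input_word)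

-- ===== LEMMAS AND PROOFS =====

-- str.count with a single-character needle is List.count of that character.
theorem pv_count_go_single (c : Char) : ∀ (l : List Char) (acc : Nat),
    PySem.Chars.count.go [c] l.length l acc = acc + l.count c
  | [], _ => rfl
  | a :: t, acc => by
    rw [show (a :: t).length = t.length + 1 from rfl, PySem.Chars.count.go]
    simp only [List.isPrefixOf, List.count_cons, List.length_singleton, List.drop_one,
      List.tail_cons, Bool.and_true]
    split_ifs with h1 h2 h3 <;> (rw [pv_count_go_single c t]; simp_all [beq_iff_eq]) <;> omega

theorem pv_count_single (l : List Char) (c : Char) : PySem.Chars.count l [c] = l.count c := by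
  simp [PySem.Chars.count, pv_count_go_single]

-- the sum of the eight per-letter counts is the one-pass membership count
theorem pv_sumcounts (l : List Char) :
    ((l.count 'q' : Int) + l.count 'x' + l.count 'y' + l.count 'j' + l.count 'ß'
      + l.count 'v' + l.count 'p' + l.count 'z')
      = l.countP (fun c => c ∈ (['q', 'x', 'y', 'j', 'ß', 'v', 'p', 'z'] : List Char)) := by
  induction l with
  | nil => simp
  | cons a t ih =>
    by_cases h : a ∈ (['q', 'x', 'y', 'j', 'ß', 'v', 'p', 'z'] : List Char)
    · simp only [List.mem_cons, List.not_mem_nil, or_false] at h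
      rcases h with h | h | h | h | h | h | h | h <;> subst h <;>
        simp at ih ⊢ <;> omega
    · have h9 := h
      simp only [List.mem_cons, List.not_mem_nil, or_false, not_or] at h9
      obtain ⟨h1, h2, h3, h4, h5, h6, h7, h8⟩ := h9
      rw [List.count_cons_of_ne h1, List.count_cons_of_ne h2,
        List.count_cons_of_ne h3, List.count_cons_of_ne h4,
        List.count_cons_of_ne h5, List.count_cons_of_ne h6,
        List.count_cons_of_ne h7, List.count_cons_of_ne h8,
        List.countP_cons]
      simp only [decide_eq_true_eq, h, if_false]
      push_cast
      omega

-- ===== VERDICT (by name: the statement is the Claim_ definition above) =====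
theorem getNumberOfRareLetters_spec : Claim_equal_getNumberOfRareLetters := by
  intro w _
  unfold Spec_getNumberOfRareLetters getNumberOfRareLetters getNumberOfRareLetters_alt
  simp only [List.foldl_cons, List.foldl_nil, PySem.Str.count,
    show ("q" : String).toList = ['q'] from rfl, show ("x" : String).toList = ['x'] from rfl,
    show ("y" : String).toList = ['y'] from rfl, show ("j" : String).toList = ['j'] from rfl,
    show ("ß" : String).toList = ['ß'] from rfl, show ("v" : String).toList = ['v'] from rfl,
    show ("p" : String).toList = ['p'] from rfl, show ("z" : String).toList = ['z'] from rfl,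
    pv_count_single, PySem.List.foldl_if_add_one]
  have hs := pv_sumcounts w.toList
  have hc : (fun c => decide (c ∈ (['q', 'x', 'y', 'j', 'ß', 'v', 'p', 'z'] : List Char)))
      = (PySem.Set.ofList ['q', 'x', 'y', 'j', 'ß', 'v', 'p', 'z']).contains := by
    funext c
    simp [PySem.Set.contains, PySem.Set.ofList]
  rw [hc] at hs
  split_ifs <;> omega
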